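-- pv_equiv track=rewrite | github.com/wanyang19880625/oj-python | LeetCode/893.特殊等价字符串组.py | numSpecialEquivGroups
-- ===== SOURCE A (Python) =====
-- from typing import List
--
-- import collections
--
-- def numSpecialEquivGroups(A: List[str]) -> int:
--     flag=[False]*len(A)
--     count=0
--     for i in range(0,len(A)):
--         if flag[i]==False:
--             dic1=collections.Counter([A[i][x] for x in range(0,len(A[i])) if x%2==0])
--             dic2=collections.Counter([A[i][x] for x in range(0,len(A[i])) if x%2==1])
--             for j in range(i+1,len(A)):
--                 dic3=collections.Counter([A[j][x] for x in range(0,len(A[j])) if x%2==0])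
--                 dic4=collections.Counter([A[j][x] for x in range(0,len(A[j])) if x%2==1])
--                 if dic1==dic3 and dic2==dic4:
--                     flag[j]=True
--             count+=1
--             flag[i]=True
--     return count
-- ===== SOURCE B (Python) =====
-- from typing import List
--
-- def numSpecialEquivGroups(A: List[str]) -> int:
--     def sig(s):
--         ev, od = [], []
--         for i, c in enumerate(s):
--             if i % 2 == 0:
--                 ev.append(c)
--             else:
--                 od.append(c)
--         return (''.join(sorted(ev)), ''.join(sorted(od)))
--     return len({sig(s) for s in A})
-- ===== Notes on version B (the rewrite author's own statement) =====
-- stated objective: faster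
-- what changed: Replaced the O(n^2) pairwise Counter comparison with a flag array by one pass that maps each string to a canonical signature (sorted even-index chars, sorted odd-index chars) and counts distinct signatures in a set.
import Mathlib
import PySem

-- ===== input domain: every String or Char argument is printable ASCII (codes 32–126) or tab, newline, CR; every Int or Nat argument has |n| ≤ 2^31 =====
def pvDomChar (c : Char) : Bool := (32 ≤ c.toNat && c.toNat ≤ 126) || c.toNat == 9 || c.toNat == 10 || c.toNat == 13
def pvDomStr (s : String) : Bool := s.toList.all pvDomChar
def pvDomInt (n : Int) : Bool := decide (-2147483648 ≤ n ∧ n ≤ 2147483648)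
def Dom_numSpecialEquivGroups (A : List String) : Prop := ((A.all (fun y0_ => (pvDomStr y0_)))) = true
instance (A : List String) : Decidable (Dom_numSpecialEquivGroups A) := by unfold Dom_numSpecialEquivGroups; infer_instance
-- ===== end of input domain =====

-- B replaces A's quadratic pairwise Counter-comparison scan (with a flag array) by one pass
-- mapping each string to a canonical signature and counting distinct signatures in a set (objective: faster).

-- ===== PORT A =====
-- [A[i][x] for x in range(0,len(s)) if x%2==r]  (r = 0 for dic1/dic3, r = 1 for dic2/dic4);
-- the index x is always in range, so pyGetD's default is unreachable
def pvCompA (s : List Char) (r : Int) : List Char :=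
  ((PySem.List.pyRange 0 (s.length : Int)).filter (fun x => PySem.Int.mod x 2 == r)).map
    (fun x => PySem.List.pyGetD s x ' ')

-- Python's 'dic1==dic3' on dicts ignores insertion order: equal key sets and equal values on
-- those (then shared) keys; exact since Dict keys are nodup
def pvDictEq (d e : PySem.Dict Char Int) : Bool :=
  PySem.Set.equal d.keys e.keys && d.keys.all (fun k => d.getD k 0 == e.getD k 0)

-- the inner 'for j in range(i+1,len(A))' loop: flag[j]=True for every later equivalent j
def pvInnerA (A : List String) (d1 d2 : PySem.Dict Char Int) (i n : Int) (fl : List Bool) : List Bool :=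
  (PySem.List.pyRange (i+1) n).foldl (fun fl j =>
    let sj := (PySem.List.pyGetD A j "").toList
    if pvDictEq d1 (PySem.Dict.counter (pvCompA sj 0)) &&
       pvDictEq d2 (PySem.Dict.counter (pvCompA sj 1)) then fl.set j.toNat true else fl) fl

-- one iteration of the outer 'for i in range(0,len(A))' loop on the state (flag, count)
def pvStepA (A : List String) (n : Int) (st : List Bool × Int) (i : Int) : List Bool × Int :=
  if PySem.List.pyGetD st.1 i false == false then
    let si := (PySem.List.pyGetD A i "").toList
    let d1 := PySem.Dict.counter (pvCompA si 0)
    let d2 := PySem.Dict.counter (pvCompA si 1)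
    ((pvInnerA A d1 d2 i n st.1).set i.toNat true, st.2 + 1)
  else st

def numSpecialEquivGroups (A : List String) : Int :=
  ((PySem.List.pyRange 0 (A.length : Int)).foldl (pvStepA A (A.length : Int))
    (List.replicate A.length false, 0)).2

-- ===== PORT B =====
-- sig(s) = (''.join(sorted(even-index chars)), ''.join(sorted(odd-index chars)))
def pvSigB (s : List Char) : String × String :=
  let p := (PySem.List.enumerate s 0).foldl
    (fun (acc : List Char × List Char) ic =>
      if PySem.Int.mod ic.1 2 == 0 then (acc.1 ++ [ic.2], acc.2) else (acc.1, acc.2 ++ [ic.2]))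
    ([], [])
  (String.ofList (PySem.List.sorted p.1 (fun c => c)),
   String.ofList (PySem.List.sorted p.2 (fun c => c)))

def numSpecialEquivGroups_alt (A : List String) : Int :=
  ((PySem.Set.ofList (A.map (fun s => pvSigB s.toList))).length : Int)

-- ===== PRECONDITION & SPEC =====
def Spec_numSpecialEquivGroups (A : List String) (out : Int) : Prop := out = numSpecialEquivGroups_alt A
instance (A : List String) (out : Int) : Decidable (Spec_numSpecialEquivGroups A out) := by unfold Spec_numSpecialEquivGroups; infer_instance

-- ===== CLAIM (what is proved, stated in full; the proofs are below) =====
def Claim_equal_numSpecialEquivGroups : Prop := ∀ (A : List String), Dom_numSpecialEquivGroups A → Spec_numSpecialEquivGroups A (numSpecialEquivGroups A)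

-- ===== LEMMAS AND PROOFS =====

theorem pvOfListChar_inj (l1 l2 : List Char) : String.ofList l1 = String.ofList l2 ↔ l1 = l2 :=
  ⟨fun h => by simpa using congrArg String.toList h, fun h => by rw [h]⟩

-- reference split of a list into (even-index elements, odd-index elements)
def pvSplit : List Char → List Char × List Char
  | [] => ([], [])
  | a :: t => (a :: (pvSplit t).2, (pvSplit t).1)

theorem pvSplit_append (l : List Char) (x : Char) :
    pvSplit (l ++ [x]) =
      if l.length % 2 = 0 then ((pvSplit l).1 ++ [x], (pvSplit l).2)
      else ((pvSplit l).1, (pvSplit l).2 ++ [x]) := by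
  induction l with
  | nil => simp [pvSplit]
  | cons a t ih =>
    simp only [List.cons_append, pvSplit, ih, List.length_cons]
    by_cases h : t.length % 2 = 0
    · have h1 : (t.length + 1) % 2 ≠ 0 := by omega
      simp [h, h1]
    · have h1 : (t.length + 1) % 2 = 0 := by omega
      simp [h, h1]

theorem pvCompA_append (l : List Char) (x : Char) (r : Int) :
    pvCompA (l ++ [x]) r =
      pvCompA l r ++ (if PySem.Int.mod (l.length : Int) 2 == r then [x] else []) := by
  unfold pvCompA
  have hlen : (((l ++ [x]).length : Nat) : Int) = (l.length : Int) + 1 := by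
    simp
  rw [hlen, PySem.List.pyRange_one_succ_right (by positivity), List.filter_append,
    List.map_append]
  congr 1
  · apply List.map_congr_left
    intro i hi
    have hi' := (List.mem_filter.mp hi).1
    obtain ⟨h0, h1⟩ := PySem.List.mem_pyRange_one.mp hi'
    have hlt : i.toNat < l.length := by omega
    rw [PySem.List.pyGetD_eq_getElem _ _ h0 (by simp; omega),
      PySem.List.pyGetD_eq_getElem _ _ h0 (by exact_mod_cast h1)]
    exact List.getElem_append_left hlt
  · rw [List.filter_singleton]
    cases h : (PySem.Int.mod (l.length : Int) 2 == r) with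
    | false => simp
    | true =>
      simp only [Bool.cond_true, List.map_singleton, if_true]
      rw [
        PySem.List.pyGetD_eq_getElem _ _ (by positivity)
          (by simp only [List.length_append, List.length_cons, List.length_nil]; push_cast; omega)]
      simp [Int.toNat_natCast]

theorem pvCompA_split (l : List Char) :
    pvCompA l 0 = (pvSplit l).1 ∧ pvCompA l 1 = (pvSplit l).2 := by
  induction l using List.reverseRecOn with
  | nil => exact ⟨rfl, rfl⟩
  | append_singleton l x ih =>
    rw [pvCompA_append, pvCompA_append, pvSplit_append, ih.1, ih.2]
    have hm : PySem.Int.mod (l.length : Int) 2 = ((l.length % 2 : Nat) : Int) := by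
      exact_mod_cast PySem.Int.mod_natCast l.length 2
    by_cases h : l.length % 2 = 0
    · simp [h]
      omega
    · have h1 : l.length % 2 = 1 := by omega
      simp [h]
      omega

theorem pvFoldB (l : List Char) :
    ((PySem.List.enumerate l 0).foldl
      (fun (acc : List Char × List Char) ic =>
        if PySem.Int.mod ic.1 2 == 0 then (acc.1 ++ [ic.2], acc.2) else (acc.1, acc.2 ++ [ic.2]))
      ([], [])) = pvSplit l := by
  induction l using List.reverseRecOn with
  | nil => rfl
  | append_singleton l x ih =>
    rw [PySem.List.enumerate_append, List.foldl_append, ih, pvSplit_append]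
    simp only [PySem.List.enumerate_cons, PySem.List.enumerate_nil, List.foldl_cons,
      List.foldl_nil, zero_add]
    have hm : PySem.Int.mod (l.length : Int) 2 = ((l.length % 2 : Nat) : Int) := by
      exact_mod_cast PySem.Int.mod_natCast l.length 2
    by_cases h : l.length % 2 = 0
    · simp [h]
      omega
    · have h1 : l.length % 2 = 1 := by omega
      simp [h]
      omega

theorem pvSigB_split (l : List Char) :
    pvSigB l = (String.ofList (PySem.List.sorted (pvSplit l).1 (fun c => c)),
                String.ofList (PySem.List.sorted (pvSplit l).2 (fun c => c))) := by
  rw [pvSigB, pvFoldB]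

theorem pvDictEq_counter (xs ys : List Char) :
    pvDictEq (PySem.Dict.counter xs) (PySem.Dict.counter ys) = true ↔ xs.Perm ys := by
  rw [pvDictEq, Bool.and_eq_true, PySem.Dict.keys_counter, PySem.Dict.keys_counter,
    PySem.Set.equal_iff, List.all_eq_true]
  constructor
  · rintro ⟨hk, hv⟩
    rw [List.perm_iff_count]
    intro c
    by_cases hc : c ∈ xs
    · have hck : c ∈ PySem.Set.ofList xs := (PySem.Set.mem_ofList _ _).mpr hc
      have hvv := hv c hck
      rw [beq_iff_eq, PySem.Dict.getD_counter, PySem.Dict.getD_counter] at hvv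
      exact_mod_cast hvv
    · by_cases hcy : c ∈ ys
      · exact absurd ((PySem.Set.mem_ofList _ _).mp ((hk c).mpr
          ((PySem.Set.mem_ofList _ _).mpr hcy))) hc
      · simp [List.count_eq_zero_of_not_mem hc, List.count_eq_zero_of_not_mem hcy]
  · intro h
    refine ⟨fun c => ?_, fun c _ => ?_⟩
    · rw [PySem.Set.mem_ofList, PySem.Set.mem_ofList]
      exact ⟨fun hx => h.mem_iff.mp hx, fun hy => h.mem_iff.mpr hy⟩
    · rw [beq_iff_eq, PySem.Dict.getD_counter, PySem.Dict.getD_counter, h.count_eq]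

theorem pvTest_iff (s t : List Char) :
    (pvDictEq (PySem.Dict.counter (pvCompA s 0)) (PySem.Dict.counter (pvCompA t 0)) &&
     pvDictEq (PySem.Dict.counter (pvCompA s 1)) (PySem.Dict.counter (pvCompA t 1))) = true
    ↔ pvSigB s = pvSigB t := by
  rw [Bool.and_eq_true, pvDictEq_counter, pvDictEq_counter, pvSigB_split, pvSigB_split,
    Prod.mk.injEq, pvOfListChar_inj, pvOfListChar_inj,
    (pvCompA_split s).1, (pvCompA_split s).2, (pvCompA_split t).1, (pvCompA_split t).2,
    PySem.List.sorted_id_eq_sorted_id_iff_perm, PySem.List.sorted_id_eq_sorted_id_iff_perm]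

-- effect of a loop that sets flag[j] := true for every j in range(a, a+k) with p j
theorem pvSetRange (p : Int → Bool) :
    ∀ (k : Nat) (a : Int) (fl : List Bool), 0 ≤ a → a + (k : Int) ≤ (fl.length : Int) →
      ((PySem.List.pyRange a (a + (k : Int))).foldl
          (fun fl j => if p j then fl.set j.toNat true else fl) fl).length = fl.length ∧
      ∀ m : Nat,
        ((PySem.List.pyRange a (a + (k : Int))).foldl
            (fun fl j => if p j then fl.set j.toNat true else fl) fl).getD m false
          = (fl.getD m false ||
              (decide (a ≤ (m : Int)) && decide ((m : Int) < a + (k : Int)) && p (m : Int))) := by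
  intro k
  induction k with
  | zero =>
    intro a fl h0 hlen
    rw [show a + ((0 : Nat) : Int) = a by simp, PySem.List.pyRange_one_eq_nil le_rfl]
    refine ⟨rfl, fun m => ?_⟩
    rw [List.foldl_nil]
    by_cases hb : a ≤ (m : Int)
    · have h2 : ¬ ((m : Int) < a) := by omega
      simp [h2]
    · simp [hb]
  | succ k ih =>
    intro a fl h0 hlen
    have hcast : a + ((k + 1 : Nat) : Int) = (a + 1) + (k : Int) := by push_cast; ring
    rw [hcast, PySem.List.pyRange_one_cons (by omega), List.foldl_cons]
    set fl1 := (if p a = true then fl.set a.toNat true else fl) with hfl1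
    have hlen1 : fl1.length = fl.length := by rw [hfl1]; split <;> simp
    have hrec := ih (a + 1) fl1 (by omega) (by rw [hlen1]; push_cast at hlen ⊢; omega)
    refine ⟨by rw [hrec.1, hlen1], fun m => ?_⟩
    rw [hrec.2 m]
    have hgd : fl1.getD m false = (fl.getD m false || (decide ((m : Int) = a) && p a)) := by
      rw [hfl1]
      cases hpa : p a with
      | false => simp
      | true =>
        rw [if_pos rfl]
        by_cases hma : (m : Int) = a
        · have hmt : a.toNat = m := by omega
          have hmlt : m < fl.length := by push_cast at hlen; omega
          rw [List.getD_eq_getElem?_getD, List.getElem?_set, hmt, if_pos rfl, if_pos hmlt]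
          simp [hma]
        · have hmt : ¬ a.toNat = m := by omega
          rw [List.getD_eq_getElem?_getD, List.getElem?_set, if_neg hmt,
            ← List.getD_eq_getElem?_getD]
          simp [hma]
    rw [hgd]
    by_cases hma : (m : Int) = a
    · rw [hma]
      have c3 : decide (a < a + 1 + (k : Int)) = true := by rw [decide_eq_true_eq]; omega
      simp [c3]
    · have c0 : decide ((m : Int) = a) = false := by simp [hma]
      have c1 : decide ((a : Int) + 1 ≤ (m : Int)) = decide (a ≤ (m : Int)) :=
        decide_eq_decide.mpr (by omega)
      rw [c0, c1]
      simp

def pvKeyAt (A : List String) (j : Nat) : String × String := pvSigB ((A.getD j "").toList)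

theorem pvOfList_append {α : Type} [BEq α] (l : List α) (x : α) :
    PySem.Set.ofList (l ++ [x]) = (PySem.Set.ofList l).add x := by
  simp [PySem.Set.ofList, List.foldl_append]

theorem pvRangeMap (A : List String) :
    (List.range A.length).map (pvKeyAt A) = A.map (fun s => pvSigB s.toList) := by
  apply List.ext_getElem
  · simp
  · intro i h1 h2
    simp only [List.getElem_map, List.getElem_range, pvKeyAt]
    congr 2
    rw [List.getD_eq_getElem?_getD, List.getElem?_eq_getElem (by simpa using h2)]
    rfl

-- the outer-loop invariant: after k iterations the count is the number of distinct
-- signatures among the first k strings, and flag[m] records "m processed or already seen"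
theorem pvOuter (A : List String) (k : Nat) (hk : k ≤ A.length) :
    ((List.range k).foldl (fun st (j : Nat) => pvStepA A (A.length : Int) st (j : Int))
        (List.replicate A.length false, (0 : Int))).1.length = A.length ∧
    ((List.range k).foldl (fun st (j : Nat) => pvStepA A (A.length : Int) st (j : Int))
        (List.replicate A.length false, (0 : Int))).2
      = ((PySem.Set.ofList ((List.range k).map (pvKeyAt A))).length : Int) ∧
    ∀ m : Nat, m < A.length →
      (((List.range k).foldl (fun st (j : Nat) => pvStepA A (A.length : Int) st (j : Int))
          (List.replicate A.length false, (0 : Int))).1.getD m false = true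
        ↔ (m < k ∨ ∃ j, j < k ∧ pvKeyAt A j = pvKeyAt A m)) := by
  induction k with
  | zero =>
    refine ⟨by simp, by simp [PySem.Set.ofList, PySem.Set.empty], fun m hm => ?_⟩
    simp [List.getD_eq_getElem?_getD, hm]
  | succ k ih =>
    have hk' : k ≤ A.length := by omega
    have hkN : k < A.length := by omega
    obtain ⟨hL, hC, hF⟩ := ih hk'
    rw [List.range_succ, List.foldl_append, List.foldl_cons, List.foldl_nil]
    set st := (List.range k).foldl (fun st (j : Nat) => pvStepA A (A.length : Int) st (j : Int))
        (List.replicate A.length false, (0 : Int)) with hst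
    have hcond : PySem.List.pyGetD st.1 (k : Int) false = st.1.getD k false :=
      PySem.List.pyGetD_natCast _ _ _
    by_cases hseen : ∃ j, j < k ∧ pvKeyAt A j = pvKeyAt A k
    · -- A[k]'s signature was already seen: the step is a no-op on the state
      have hflag : st.1.getD k false = true := (hF k hkN).mpr (Or.inr hseen)
      have hstep : pvStepA A (A.length : Int) st (k : Int) = st := by
        rw [pvStepA, hcond, hflag]
        simp
      rw [hstep]
      refine ⟨hL, ?_, fun m hm => ?_⟩
      · rw [hC, List.map_append, List.map_singleton, pvOfList_append,
          PySem.Set.add_of_mem]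
        apply (PySem.Set.mem_ofList _ _).mpr
        obtain ⟨j, hj, he⟩ := hseen
        exact List.mem_map.mpr ⟨j, List.mem_range.mpr hj, he⟩
      · rw [hF m hm]
        constructor
        · rintro (h | ⟨j, hj, he⟩)
          · exact Or.inl (by omega)
          · exact Or.inr ⟨j, by omega, he⟩
        · rintro (h | ⟨j, hj, he⟩)
          · by_cases hmk : m < k
            · exact Or.inl hmk
            · have hmke : m = k := by omega
              subst hmke
              exact Or.inr hseen
          · by_cases hjk : j < k
            · exact Or.inr ⟨j, hjk, he⟩
            · have hjke : j = k := by omega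
              subst hjke
              obtain ⟨j0, hj0, he0⟩ := hseen
              exact Or.inr ⟨j0, hj0, he0.trans he⟩
    · -- A[k] is a new signature: count increments and later equivalents get flagged
      have hflag : st.1.getD k false = false := by
        cases hb : st.1.getD k false
        · rfl
        · rcases (hF k hkN).mp hb with h | h
          · omega
          · exact absurd h hseen
      have hgetA : PySem.List.pyGetD A (k : Int) "" = A.getD k "" :=
        PySem.List.pyGetD_natCast _ _ _
      rw [pvStepA, hcond, hflag]
      simp only [BEq.rfl, if_true, hgetA]
      rw [pvInnerA]
      have hNsplit : ((A.length : Nat) : Int) = ((k : Int) + 1) + ((A.length - (k+1) : Nat) : Int) := by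
        omega
      rw [hNsplit]
      have hrange := pvSetRange
        (fun j => pvDictEq (PySem.Dict.counter (pvCompA (A.getD k "").toList 0))
            (PySem.Dict.counter (pvCompA (PySem.List.pyGetD A j "").toList 0)) &&
          pvDictEq (PySem.Dict.counter (pvCompA (A.getD k "").toList 1))
            (PySem.Dict.counter (pvCompA (PySem.List.pyGetD A j "").toList 1)))
        (A.length - (k+1)) ((k : Int) + 1) st.1 (by omega) (by rw [hL]; omega)
      refine ⟨?_, ?_, fun m hm => ?_⟩
      · rw [List.length_set, hrange.1, hL]
      · rw [hC, List.map_append, List.map_singleton, pvOfList_append,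
          PySem.Set.add_of_not_mem, List.length_append]
        · simp
        · intro hmem
          obtain ⟨j, hj, he⟩ := List.mem_map.mp ((PySem.Set.mem_ofList _ _).mp hmem)
          exact hseen ⟨j, List.mem_range.mp hj, he⟩
      · have htn : ((k : Int)).toNat = k := Int.toNat_natCast k
        rw [htn]
        by_cases hmk : m = k
        · subst hmk
          have hmlen : m < ((PySem.List.pyRange ((m : Int) + 1)
              (((m : Int) + 1) + ((A.length - (m+1) : Nat) : Int))).foldl
              (fun fl j => if pvDictEq (PySem.Dict.counter (pvCompA (A.getD m "").toList 0))
                    (PySem.Dict.counter (pvCompA (PySem.List.pyGetD A j "").toList 0)) &&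
                  pvDictEq (PySem.Dict.counter (pvCompA (A.getD m "").toList 1))
                    (PySem.Dict.counter (pvCompA (PySem.List.pyGetD A j "").toList 1))
                then fl.set j.toNat true else fl) st.1).length := by
            rw [hrange.1, hL]; omega
          rw [List.getD_eq_getElem?_getD, List.getElem?_set, if_pos rfl, if_pos hmlen]
          simp
        · rw [List.getD_eq_getElem?_getD, List.getElem?_set, if_neg (fun h => hmk h.symm),
            ← List.getD_eq_getElem?_getD, hrange.2 m]
          have hget : PySem.List.pyGetD A (m : Int) "" = A.getD m "" :=
            PySem.List.pyGetD_natCast _ _ _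
          constructor
          · intro h
            rcases Bool.or_eq_true _ _ |>.mp h with h | h
            · rcases (hF m hm).mp h with h' | h'
              · exact Or.inl (by omega)
              · obtain ⟨j, hj, he⟩ := h'
                exact Or.inr ⟨j, by omega, he⟩
            · rw [Bool.and_eq_true, Bool.and_eq_true] at h
              obtain ⟨⟨h1, h2⟩, h3⟩ := h
              beta_reduce at h3
              rw [hget] at h3
              have := (pvTest_iff _ _).mp h3
              exact Or.inr ⟨k, by omega, this⟩
          · rintro (h | ⟨j, hj, he⟩)
            · have hmk' : m < k := by omega
              rw [(hF m hm).mpr (Or.inl hmk')]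
              simp
            · by_cases hjk : j < k
              · rw [(hF m hm).mpr (Or.inr ⟨j, hjk, he⟩)]
                simp
              · have hjke : j = k := by omega
                rw [hjke] at he
                by_cases hmk' : m < k
                · rw [(hF m hm).mpr (Or.inl hmk')]
                  simp
                apply Bool.or_eq_true _ _ |>.mpr
                right
                rw [Bool.and_eq_true, Bool.and_eq_true]
                refine ⟨⟨?_, ?_⟩, ?_⟩
                · rw [decide_eq_true_eq]; omega
                · rw [decide_eq_true_eq]; omega
                · beta_reduce
                  rw [hget]
                  exact (pvTest_iff _ _).mpr he

-- ===== VERDICT (by name: the statement is the Claim_ definition above) =====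
theorem numSpecialEquivGroups_spec : Claim_equal_numSpecialEquivGroups := by
  intro A _
  unfold Spec_numSpecialEquivGroups
  rw [numSpecialEquivGroups, numSpecialEquivGroups_alt, PySem.List.pyRange_one,
    List.foldl_map]
  simp only [Int.sub_zero, Int.toNat_natCast, zero_add]
  have h := (pvOuter A A.length le_rfl).2.1
  rw [h, pvRangeMap]
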